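-- pv_equiv track=rewrite | github.com/BiswasMosam/Flex-Card | app.py | _storage_to_lines
-- ===== SOURCE A (Python) =====
-- def _storage_to_lines(drives):
--     chunks = []
--     for drive in drives:
--         chunks.append(
--             f"Drive: {drive.get('Drive', 'N/A')}\n"
--             f"Mount: {drive.get('Mount', 'N/A')}\n"
--             f"File System: {drive.get('File System', 'N/A')}\n"
--             f"Total: {drive.get('Total', 'N/A')}\n"
--             f"Free: {drive.get('Free', 'N/A')}"
--         )
--     return "\n\n".join(chunks)
-- ===== SOURCE B (Python) =====
-- _FIELDS = ('Drive', 'Mount', 'File System', 'Total', 'Free')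
--
-- def _fields_text(drive, fields):
--     line = f"{fields[0]}: {drive.get(fields[0], 'N/A')}"
--     if len(fields) == 1:
--         return line
--     return line + '\n' + _fields_text(drive, fields[1:])
--
-- def _storage_to_lines(drives):
--     if not drives:
--         return ''
--     block = _fields_text(drives[0], _FIELDS)
--     if len(drives) == 1:
--         return block
--     return block + '\n\n' + _storage_to_lines(drives[1:])
-- ===== Notes on version B (the rewrite author's own statement) =====
-- stated objective: alternative
-- what changed: Replaces the iterative chunk-list + join (with one hard-coded five-line f-string per drive) by direct structural recursion over the drive list and over a field-name table, concatenating separators in place with no intermediate lists and no join.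
import Mathlib
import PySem

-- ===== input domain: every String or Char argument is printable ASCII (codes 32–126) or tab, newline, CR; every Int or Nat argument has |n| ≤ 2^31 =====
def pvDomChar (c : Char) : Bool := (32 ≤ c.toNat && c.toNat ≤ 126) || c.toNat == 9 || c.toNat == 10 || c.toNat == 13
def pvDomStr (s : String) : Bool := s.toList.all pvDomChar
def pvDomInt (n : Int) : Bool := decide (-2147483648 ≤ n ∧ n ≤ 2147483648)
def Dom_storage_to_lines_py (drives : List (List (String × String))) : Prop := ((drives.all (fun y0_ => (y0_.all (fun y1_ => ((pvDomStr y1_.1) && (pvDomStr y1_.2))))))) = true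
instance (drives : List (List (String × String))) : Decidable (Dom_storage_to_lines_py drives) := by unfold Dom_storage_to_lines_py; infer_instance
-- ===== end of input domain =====

-- B replaces A's chunk-list + join loop with direct structural recursion (over drives and a field table), concatenating separators in place; objective: alternative decomposition, same cost.


-- ===== PORT A =====
def pvBlockA (drive : List (String × String)) : String :=
  "Drive: " ++ (PySem.Dict.mk drive).getD "Drive" "N/A" ++
  "\nMount: " ++ (PySem.Dict.mk drive).getD "Mount" "N/A" ++
  "\nFile System: " ++ (PySem.Dict.mk drive).getD "File System" "N/A" ++
  "\nTotal: " ++ (PySem.Dict.mk drive).getD "Total" "N/A" ++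
  "\nFree: " ++ (PySem.Dict.mk drive).getD "Free" "N/A"

def storage_to_lines_py (drives : List (List (String × String))) : String :=
  PySem.Str.join "\n\n" (drives.foldl (fun chunks drive => chunks ++ [pvBlockA drive]) [])

-- ===== PORT B =====
def pvFields : List String := ["Drive", "Mount", "File System", "Total", "Free"]

-- recursion over a non-empty field list; the [] case is unreachable in B (Python would raise there)
def pvFieldsText (drive : List (String × String)) : List String → String
  | [] => ""
  | [k] => k ++ ": " ++ (PySem.Dict.mk drive).getD k "N/A"
  | k :: k' :: rest =>
      (k ++ ": " ++ (PySem.Dict.mk drive).getD k "N/A") ++ "\n" ++ pvFieldsText drive (k' :: rest)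

def storage_to_lines_py_alt : List (List (String × String)) → String
  | [] => ""
  | [d] => pvFieldsText d pvFields
  | d :: d' :: rest => pvFieldsText d pvFields ++ "\n\n" ++ storage_to_lines_py_alt (d' :: rest)

-- ===== PRECONDITION & SPEC =====
def Spec_storage_to_lines_py (drives : List (List (String × String))) (out : String) : Prop := out = storage_to_lines_py_alt drives
instance (drives : List (List (String × String))) (out : String) : Decidable (Spec_storage_to_lines_py drives out) := by unfold Spec_storage_to_lines_py; infer_instance

-- ===== CLAIM (what is proved, stated in full; the proofs are below) =====
def Claim_equal_storage_to_lines_py : Prop := ∀ (drives : List (List (String × String))), Dom_storage_to_lines_py drives → Spec_storage_to_lines_py drives (storage_to_lines_py drives)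

-- ===== LEMMAS AND PROOFS =====
theorem pvFoldl_map (drives : List (List (String × String))) (acc : List String) :
    drives.foldl (fun chunks drive => chunks ++ [pvBlockA drive]) acc = acc ++ drives.map pvBlockA := by
  induction drives generalizing acc with
  | nil => simp
  | cons d t ih => simp [List.foldl, ih]

theorem pvBlock_eq (drive : List (String × String)) : pvBlockA drive = pvFieldsText drive pvFields := by
  simp only [pvBlockA, pvFieldsText, pvFields]
  rw [show ("Drive: " : String) = "Drive" ++ ": " from rfl,
      show ("\nMount: " : String) = "\n" ++ ("Mount" ++ ": ") from rfl,
      show ("\nFile System: " : String) = "\n" ++ ("File System" ++ ": ") from rfl,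
      show ("\nTotal: " : String) = "\n" ++ ("Total" ++ ": ") from rfl,
      show ("\nFree: " : String) = "\n" ++ ("Free" ++ ": ") from rfl]
  simp only [String.append_assoc]

theorem pvJoin_cons (a b : String) (t : List String) :
    PySem.Str.join "\n\n" (a :: b :: t) = a ++ "\n\n" ++ PySem.Str.join "\n\n" (b :: t) := by
  apply String.ext
  simp [PySem.Chars.join_cons_cons, String.append_assoc]

theorem pvJoin_map (drives : List (List (String × String))) :
    PySem.Str.join "\n\n" (drives.map pvBlockA) = storage_to_lines_py_alt drives := by
  induction drives with
  | nil =>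
      apply String.ext
      simp [storage_to_lines_py_alt, PySem.Chars.join_nil]
  | cons d t ih =>
      cases t with
      | nil =>
          rw [show ([d].map pvBlockA) = [pvBlockA d] from rfl]
          rw [storage_to_lines_py_alt, ← pvBlock_eq]
          apply String.ext
          simp [PySem.Chars.join_singleton]
      | cons d' t' =>
          simp only [List.map]
          rw [pvJoin_cons]
          simp only [List.map] at ih
          rw [ih]
          simp [storage_to_lines_py_alt, pvBlock_eq]

-- ===== VERDICT (by name: the statement is the Claim_ definition above) =====
theorem storage_to_lines_py_spec : Claim_equal_storage_to_lines_py := by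
  intro drives _
  unfold Spec_storage_to_lines_py storage_to_lines_py
  rw [pvFoldl_map, List.nil_append, pvJoin_map]
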